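-- pv_equiv track=rewrite | github.com/xiangfeiye/PN-design | Td/utils.py | get_brackets_atoms
-- ===== SOURCE A (Python) =====
-- def check_brackets_atoms(split_smiles):
--     smiles_list = split_smiles
--     stack = []
--     brackets = []
--
--     for i, char in enumerate(smiles_list):
--         if char == "(":
--             stack.append(i)
--         elif char == ")":
--             start = stack.pop()
--             brackets.append([start, i])
--
--     return brackets
--
-- def get_brackets_atoms(split_smiles, atom_maps, contribution_dict=None):
--     if contribution_dict is None:
--         contribution_dict = {}
--     brackets = check_brackets_atoms(split_smiles)
--     clear_idx = []
--     for bracket in brackets: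
--         atoms = []
--         for i in range(bracket[0], bracket[1]):
--             if i in atom_maps:
--                 atoms.append(i)
--         contribution_dict[bracket[0]] = atoms
--         contribution_dict[bracket[1]] = atoms
--         clear_idx += bracket
--     return contribution_dict, clear_idx
-- ===== SOURCE B (Python) =====
-- def _bisect_left(a, x):
--     lo, hi = 0, len(a)
--     while lo < hi:
--         mid = (lo + hi) // 2
--         if a[mid] < x:
--             lo = mid + 1
--         else:
--             hi = mid
--     return lo
--
-- def get_brackets_atoms(split_smiles, atom_maps, contribution_dict=None):
--     # One pass over the tokens; atom keys sorted once, each bracket's atoms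
--     # taken by binary search instead of scanning the whole index range.
--     if contribution_dict is None:
--         contribution_dict = {}
--     keys = sorted(atom_maps)
--     clear_idx = []
--     stack = []
--     for i, tok in enumerate(split_smiles):
--         if tok == "(":
--             stack.append(i)
--         elif tok == ")":
--             start = stack.pop()
--             atoms = keys[_bisect_left(keys, start):_bisect_left(keys, i)]
--             contribution_dict[start] = atoms
--             contribution_dict[i] = atoms
--             clear_idx.append(start)
--             clear_idx.append(i)
--     return contribution_dict, clear_idx
-- ===== Notes on version B (the rewrite author's own statement) =====
-- stated objective: alternative
-- what changed: B makes a single pass over the tokens (instead of collecting brackets first and then looping over them) and, with atom_maps' keys sorted once, takes each bracket's atoms as a binary-search slice of the sorted keys instead of testing dict membership for every index in the bracket's range.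
import Mathlib
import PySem

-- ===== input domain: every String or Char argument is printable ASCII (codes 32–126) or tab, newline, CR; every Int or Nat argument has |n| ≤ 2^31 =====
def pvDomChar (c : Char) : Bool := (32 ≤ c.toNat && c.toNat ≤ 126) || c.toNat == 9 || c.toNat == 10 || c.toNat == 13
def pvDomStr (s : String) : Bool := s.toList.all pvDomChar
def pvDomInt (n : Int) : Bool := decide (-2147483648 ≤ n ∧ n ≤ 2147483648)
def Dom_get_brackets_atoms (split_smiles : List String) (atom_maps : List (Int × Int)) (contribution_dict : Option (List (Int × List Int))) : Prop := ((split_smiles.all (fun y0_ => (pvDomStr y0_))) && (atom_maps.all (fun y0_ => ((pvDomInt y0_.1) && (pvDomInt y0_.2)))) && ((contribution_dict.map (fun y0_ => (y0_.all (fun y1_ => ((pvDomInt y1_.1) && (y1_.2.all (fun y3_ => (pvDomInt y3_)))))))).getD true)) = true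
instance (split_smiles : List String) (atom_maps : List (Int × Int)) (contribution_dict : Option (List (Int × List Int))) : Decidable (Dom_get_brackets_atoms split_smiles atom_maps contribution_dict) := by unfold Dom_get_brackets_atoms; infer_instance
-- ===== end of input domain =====

-- B replaces A's per-bracket scan of the whole index range (dict-membership test on
-- every index) by one pass over the tokens with the atom keys sorted once and each
-- bracket's atoms taken as a binary-search slice of the sorted keys.
-- Both A and B mutate a caller-supplied contribution_dict in place; the equivalence
-- proved here is about the RETURN value.

-- ===== PORT A =====
-- the for-loop of check_brackets_atoms as structural recursion over the tokens,
-- carrying the index, stack and brackets accumulator; none = the IndexError of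
-- stack.pop() on an empty stack.
def chkLoop : List String → Int → List Int → List (Int × Int) → Option (List Int × List (Int × Int))
  | [], _, stack, brackets => some (stack, brackets)
  | ch :: rest, i, stack, brackets =>
    if ch = "(" then chkLoop rest (i + 1) (i :: stack) brackets
    else if ch = ")" then
      match stack with
      | [] => none
      | s :: st => chkLoop rest (i + 1) st (brackets ++ [(s, i)])
    else chkLoop rest (i + 1) stack brackets

def check_brackets_atoms (split_smiles : List String) : Option (List (Int × Int)) :=
  (chkLoop split_smiles 0 [] []).map (·.2)

-- body of A's `for bracket in brackets` loop
def stepA (am : PySem.Dict Int Int) (acc : PySem.Dict Int (List Int) × List Int) (b : Int × Int) : PySem.Dict Int (List Int) × List Int :=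
  let atoms := (PySem.List.pyRange b.1 b.2).foldl
    (fun a i => if am.contains i then a ++ [i] else a) []
  ((acc.1.insert b.1 atoms).insert b.2 atoms, acc.2 ++ [b.1, b.2])

def get_brackets_atoms (split_smiles : List String) (atom_maps : List (Int × Int)) (contribution_dict : Option (List (Int × List Int))) : (List (Int × List Int)) × List Int :=
  let cd0 : PySem.Dict Int (List Int) := ⟨contribution_dict.getD []⟩
  match check_brackets_atoms split_smiles with
  | none => ([], [])   -- unreachable under Pre_: the Python raises IndexError here
  | some brackets =>
    let r := brackets.foldl (stepA ⟨atom_maps⟩) (cd0, [])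
    (r.1.items, r.2)

-- ===== PORT B =====
-- Source B's _bisect_left is the textbook lo/hi binary-search loop, which is exactly
-- PySem.List.bisectLeft's definition; keys[lo:hi] is PySem.List.slice.
def bStep (ks : List Int) (acc : PySem.Dict Int (List Int) × List Int) (p : Int × Int) : PySem.Dict Int (List Int) × List Int :=
  let atoms := PySem.List.slice ks (some ((PySem.List.bisectLeft ks p.1 : Nat) : Int)) (some ((PySem.List.bisectLeft ks p.2 : Nat) : Int))
  ((acc.1.insert p.1 atoms).insert p.2 atoms, acc.2 ++ [p.1, p.2])

-- B's single for-loop over the tokens (index, stack, dict, clear_idx as state)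
def bLoop (ks : List Int) : List String → Int → List Int → PySem.Dict Int (List Int) → List Int → Option (PySem.Dict Int (List Int) × List Int)
  | [], _, _, d, c => some (d, c)
  | tok :: rest, i, stack, d, c =>
    if tok = "(" then bLoop ks rest (i + 1) (i :: stack) d c
    else if tok = ")" then
      match stack with
      | [] => none   -- stack.pop() raises IndexError here in Source B too
      | s :: st =>
        let acc := bStep ks (d, c) (s, i)
        bLoop ks rest (i + 1) st acc.1 acc.2
    else bLoop ks rest (i + 1) stack d c

def get_brackets_atoms_alt (split_smiles : List String) (atom_maps : List (Int × Int)) (contribution_dict : Option (List (Int × List Int))) : (List (Int × List Int)) × List Int :=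
  let ks := PySem.List.sorted (PySem.Dict.keys (⟨atom_maps⟩ : PySem.Dict Int Int)) (fun x => x)
  match bLoop ks split_smiles 0 [] ⟨contribution_dict.getD []⟩ [] with
  | none => ([], [])
  | some r => (r.1.items, r.2)

-- ===== PRECONDITION & SPEC =====
-- Pre_ excludes (a) token lists with a ')' not matched by an earlier '(' — there A's
-- stack.pop() raises IndexError — and (b) atom_maps with duplicate keys, which a
-- Python dict (the declared type of atom_maps) can never contain.
def Pre_get_brackets_atoms (split_smiles : List String) (atom_maps : List (Int × Int)) (contribution_dict : Option (List (Int × List Int))) : Prop :=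
  (∀ k, k ≤ split_smiles.length → (split_smiles.take k).count ")" ≤ (split_smiles.take k).count "(") ∧
  (atom_maps.map Prod.fst).Nodup
instance (split_smiles : List String) (atom_maps : List (Int × Int)) (contribution_dict : Option (List (Int × List Int))) : Decidable (Pre_get_brackets_atoms split_smiles atom_maps contribution_dict) := by unfold Pre_get_brackets_atoms; infer_instance

def pvWitness_get_brackets_atoms : List String × (List (Int × Int)) × (Option (List (Int × List Int))) :=
  (["(", "C", ")"], ([(1, 0), (2, 3)], some [(0, [9])]))

def Spec_get_brackets_atoms (split_smiles : List String) (atom_maps : List (Int × Int)) (contribution_dict : Option (List (Int × List Int))) (out : (List (Int × List Int)) × List Int) : Prop := out = get_brackets_atoms_alt split_smiles atom_maps contribution_dict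
instance (split_smiles : List String) (atom_maps : List (Int × Int)) (contribution_dict : Option (List (Int × List Int))) (out : (List (Int × List Int)) × List Int) : Decidable (Spec_get_brackets_atoms split_smiles atom_maps contribution_dict out) := by unfold Spec_get_brackets_atoms; infer_instance

-- ===== CLAIM (what is proved, stated in full; the proofs are below) =====
def Claim_equal_get_brackets_atoms : Prop := ∀ (split_smiles : List String) (atom_maps : List (Int × Int)) (contribution_dict : Option (List (Int × List Int))), Dom_get_brackets_atoms split_smiles atom_maps contribution_dict → Pre_get_brackets_atoms split_smiles atom_maps contribution_dict → Spec_get_brackets_atoms split_smiles atom_maps contribution_dict (get_brackets_atoms split_smiles atom_maps contribution_dict)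

-- ===== LEMMAS AND PROOFS =====

-- two strictly increasing integer lists with the same members are equal
theorem pv_strict_eq (l1 l2 : List Int) (h1 : l1.Pairwise (· < ·)) (h2 : l2.Pairwise (· < ·))
    (hm : ∀ x, x ∈ l1 ↔ x ∈ l2) : l1 = l2 := by
  have n1 : l1.Nodup := h1.imp (fun h => ne_of_lt h)
  have n2 : l2.Nodup := h2.imp (fun h => ne_of_lt h)
  have p := (List.perm_ext_iff_of_nodup n1 n2).mpr hm
  exact p.eq_of_pairwise (fun a b _ _ hab hba => absurd hba (asymm hab)) h1 h2

-- the bisect slice of a strictly sorted list is the in-range filter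
theorem pv_slice_bisect (ks : List Int) (hp : ks.Pairwise (· < ·)) (a b : Int) :
    PySem.List.slice ks (some ((PySem.List.bisectLeft ks a : Nat) : Int)) (some ((PySem.List.bisectLeft ks b : Nat) : Int))
      = ks.filter (fun k => decide (a ≤ k) && decide (k < b)) := by
  have hle : ks.Pairwise (· ≤ ·) := hp.imp (fun h => le_of_lt h)
  obtain ⟨halen, haltl, haltr⟩ := PySem.List.bisectLeft_spec ks a hle
  obtain ⟨hblen, hbltl, hbltr⟩ := PySem.List.bisectLeft_spec ks b hle
  rw [PySem.List.slice_natCast]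
  set lo := PySem.List.bisectLeft ks a with hlo
  set hi := PySem.List.bisectLeft ks b with hhi
  have hL : (List.take (hi - lo) (List.drop lo ks)).length = min (hi - lo) (ks.length - lo) := by
    simp [List.length_take, List.length_drop]
  apply pv_strict_eq
  · exact List.Pairwise.sublist ((List.take_sublist _ _).trans (List.drop_sublist _ _)) hp
  · exact hp.filter _
  · intro x
    constructor
    · intro hx
      obtain ⟨j, hj, rfl⟩ := List.mem_iff_getElem.mp hx
      have hb1 : lo + j < hi := by rw [hL] at hj; omega
      have hb2 : lo + j < ks.length := by rw [hL] at hj; omega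
      have e1 : (List.take (hi - lo) (List.drop lo ks))[j]'hj = ks[lo + j]'hb2 := by
        rw [List.getElem_take, List.getElem_drop]
      rw [List.mem_filter, e1]
      refine ⟨List.getElem_mem _, ?_⟩
      have h1 : a ≤ ks[lo + j]'hb2 := haltr (lo + j) hb2 (by omega)
      have h2 : ks[lo + j]'hb2 < b := hbltl (lo + j) hb2 hb1
      simp [h1, h2]
    · intro hx
      rw [List.mem_filter] at hx
      obtain ⟨hxm, hxr⟩ := hx
      simp only [Bool.and_eq_true, decide_eq_true_eq] at hxr
      obtain ⟨i, hilen, rfl⟩ := List.mem_iff_getElem.mp hxm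
      have hge : lo ≤ i := by
        by_contra h
        exact absurd hxr.1 (not_le.mpr (haltl i hilen (by omega)))
      have hlt : i < hi := by
        by_contra h
        exact absurd hxr.2 (not_lt.mpr (hbltr i hilen (by omega)))
      rw [List.mem_iff_getElem]
      have hidx : i - lo < (List.take (hi - lo) (List.drop lo ks)).length := by
        rw [hL]; omega
      refine ⟨i - lo, hidx, ?_⟩
      have hb2 : lo + (i - lo) < ks.length := by omega
      have e1 : (List.take (hi - lo) (List.drop lo ks))[i - lo]'hidx = ks[lo + (i - lo)]'hb2 := by
        rw [List.getElem_take, List.getElem_drop]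
      rw [e1]
      congr 1
      omega

-- A's per-bracket inner loop computes the same atoms list as B's bisect slice
theorem pv_atoms_eq (atom_maps : List (Int × Int)) (hnd : (atom_maps.map Prod.fst).Nodup) (a b : Int) :
    (PySem.List.pyRange a b).foldl
        (fun acc i => if (PySem.Dict.mk atom_maps : PySem.Dict Int Int).contains i then acc ++ [i] else acc) []
      = PySem.List.slice (PySem.List.sorted (PySem.Dict.keys (⟨atom_maps⟩ : PySem.Dict Int Int)) (fun x => x))
          (some ((PySem.List.bisectLeft (PySem.List.sorted (PySem.Dict.keys (⟨atom_maps⟩ : PySem.Dict Int Int)) (fun x => x)) a : Nat) : Int))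
          (some ((PySem.List.bisectLeft (PySem.List.sorted (PySem.Dict.keys (⟨atom_maps⟩ : PySem.Dict Int Int)) (fun x => x)) b : Nat) : Int)) := by
  set ks := PySem.List.sorted (PySem.Dict.keys (⟨atom_maps⟩ : PySem.Dict Int Int)) (fun x => x) with hks
  have hknd : ks.Nodup := by
    have hperm := PySem.List.sorted_perm (PySem.Dict.keys (⟨atom_maps⟩ : PySem.Dict Int Int)) (fun x => x) false
    rw [PySem.Dict.keys_mk] at hperm
    exact hperm.nodup_iff.mpr hnd
  have hkp : ks.Pairwise (· < ·) := by
    have hle := PySem.List.sorted_pairwise (PySem.Dict.keys (⟨atom_maps⟩ : PySem.Dict Int Int)) (fun x => x)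
    exact (hle.and hknd).imp (fun h => lt_of_le_of_ne h.1 h.2)
  have hmem : ∀ x : Int, x ∈ ks ↔ (PySem.Dict.mk atom_maps : PySem.Dict Int Int).contains x = true := by
    intro x
    rw [hks, PySem.List.mem_sorted, PySem.Dict.contains_iff_mem_keys]
  rw [PySem.List.foldl_append_if_eq_filter, List.nil_append, pv_slice_bisect ks hkp a b]
  apply pv_strict_eq
  · exact (PySem.List.pairwise_lt_pyRange_one a b).filter _
  · exact hkp.filter _
  · intro x
    simp only [List.mem_filter, PySem.List.mem_pyRange_one, Bool.and_eq_true, decide_eq_true_eq]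
    rw [← hmem x]
    tauto

-- the brackets accumulator of chkLoop only collects at the end
theorem pv_chk_accum (ss : List String) : ∀ (i : Int) (stack : List Int) (br : List (Int × Int)),
    chkLoop ss i stack br = (chkLoop ss i stack []).map (fun r => (r.1, br ++ r.2)) := by
  induction ss with
  | nil => intro i stack br; simp [chkLoop]
  | cons ch rest ih =>
    intro i stack br
    by_cases h1 : ch = "("
    · simp only [chkLoop, if_pos h1]
      exact ih (i + 1) (i :: stack) br
    · by_cases h2 : ch = ")"
      · cases stack with
        | nil => simp only [chkLoop, if_neg h1, if_pos h2, Option.map_none]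
        | cons s st =>
          simp only [chkLoop, if_neg h1, if_pos h2, List.nil_append]
          rw [ih (i + 1) st (br ++ [(s, i)]), ih (i + 1) st [(s, i)]]
          cases chkLoop rest (i + 1) st [] with
          | none => rfl
          | some r => simp
      · simp only [chkLoop, if_neg h1, if_neg h2]
        exact ih (i + 1) stack br

-- B's single pass = A's bracket list folded with B's step
theorem pv_bLoop_eq (ks : List Int) (ss : List String) :
    ∀ (i : Int) (stack : List Int) (d : PySem.Dict Int (List Int)) (c : List Int),
    bLoop ks ss i stack d c = (chkLoop ss i stack []).map (fun r => r.2.foldl (bStep ks) (d, c)) := by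
  induction ss with
  | nil => intro i stack d c; simp [bLoop, chkLoop]
  | cons tok rest ih =>
    intro i stack d c
    by_cases h1 : tok = "("
    · simp only [bLoop, chkLoop, if_pos h1]
      exact ih (i + 1) (i :: stack) d c
    · by_cases h2 : tok = ")"
      · cases stack with
        | nil => simp only [bLoop, chkLoop, if_neg h1, if_pos h2, Option.map_none]
        | cons s st =>
          simp only [bLoop, chkLoop, if_neg h1, if_pos h2, List.nil_append]
          rw [ih (i + 1) st _ _, pv_chk_accum rest (i + 1) st [(s, i)]]
          cases chkLoop rest (i + 1) st [] with
          | none => rfl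
          | some r => simp [List.foldl_cons]
      · simp only [bLoop, chkLoop, if_neg h1, if_neg h2]
        exact ih (i + 1) stack d c

-- under unique keys, A's step equals B's step
theorem pv_step_eq (atom_maps : List (Int × Int)) (hnd : (atom_maps.map Prod.fst).Nodup) :
    stepA ⟨atom_maps⟩ = bStep (PySem.List.sorted (PySem.Dict.keys (⟨atom_maps⟩ : PySem.Dict Int Int)) (fun x => x)) := by
  funext acc p
  simp only [stepA, bStep, pv_atoms_eq atom_maps hnd p.1 p.2]

-- ===== VERDICT (by name: the statement is the Claim_ definition above) =====
theorem get_brackets_atoms_spec : Claim_equal_get_brackets_atoms := by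
  intro ss am cd _ hpre
  unfold Spec_get_brackets_atoms get_brackets_atoms get_brackets_atoms_alt check_brackets_atoms
  simp only [pv_bLoop_eq, pv_step_eq am hpre.2]
  cases chkLoop ss 0 [] [] with
  | none => rfl
  | some r => simp
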